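-- pv_equiv track=rewrite | github.com/niasand/experiment_code | python_tricks/Knapsack_pack.py | getValue
-- ===== SOURCE A (Python) =====
-- def getValue(W, V, MAX, i):
--     if i > 1:
--         # 不放第i件物品最大价值
--         DoNotPutThe_indexi_goods_in_bag_Value,\
--             DoNotPutThe_indexi_goods_in_bag_Weight = getValue(W, V, MAX, i - 1)
--         # 如果第i件物品的重量大于背包最大容量
--         if W[i - 1] > MAX:  # 如果这个地方为真，那就不能放i进去了，因为放i进去，背包就装不下了，既然不放i，那就是返回上面不放i的值，
--             return DoNotPutThe_indexi_goods_in_bag_Value, DoNotPutThe_indexi_goods_in_bag_Weight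
--         else:  # 如果第i件物品的重量小于背包最大容量，那就可以把i放进去了。那把i放进去了后，包包剩下的重量就是max减去i的重量，
--             changed_Value, changed_Weight = getValue(
--                 W, V, MAX - W[i - 1], i - 1)
--             if changed_Value + \
--                     V[i - 1] > DoNotPutThe_indexi_goods_in_bag_Value:
--                 return changed_Value + V[i - 1], changed_Weight
--             else:
--                 return DoNotPutThe_indexi_goods_in_bag_Value, DoNotPutThe_indexi_goods_in_bag_Weight
--     else:
--         if W[0] > MAX:
--             return 0, MAX
--         else:
--             return V[0], MAX - W[0]
-- ===== SOURCE B (Python) =====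
-- def getValue(W, V, MAX, i):
--     memo = {}
--
--     def solve(cap, j):
--         key = (cap, j)
--         if key in memo:
--             return memo[key]
--         if j > 1:
--             v0, w0 = solve(cap, j - 1)
--             wj = W[j - 1]
--             if wj > cap:
--                 res = (v0, w0)
--             else:
--                 v1, w1 = solve(cap - wj, j - 1)
--                 vj = V[j - 1]
--                 if v1 + vj > v0:
--                     res = (v1 + vj, w1)
--                 else:
--                     res = (v0, w0)
--         else:
--             if W[0] > cap:
--                 res = (0, cap)
--             else:
--                 res = (V[0], cap - W[0])
--         memo[key] = res
--         return res
--
--     return solve(MAX, i)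
-- ===== Notes on version B (the rewrite author's own statement) =====
-- stated objective: alternative
-- what changed: Replaces A's naive branching recursion with memoized dynamic programming: a dictionary keyed by (capacity, item) caches each state, so every reachable state is solved once with the same recurrence and tie-break.
-- outside the precondition, e.g. on getValue([5], [], 3, 1): A returns (0, 3), B returns (0, 3); on getValue([2, 50], [7], 10, 2): A returns (7, 8), B returns (7, 8)
import Mathlib
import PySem

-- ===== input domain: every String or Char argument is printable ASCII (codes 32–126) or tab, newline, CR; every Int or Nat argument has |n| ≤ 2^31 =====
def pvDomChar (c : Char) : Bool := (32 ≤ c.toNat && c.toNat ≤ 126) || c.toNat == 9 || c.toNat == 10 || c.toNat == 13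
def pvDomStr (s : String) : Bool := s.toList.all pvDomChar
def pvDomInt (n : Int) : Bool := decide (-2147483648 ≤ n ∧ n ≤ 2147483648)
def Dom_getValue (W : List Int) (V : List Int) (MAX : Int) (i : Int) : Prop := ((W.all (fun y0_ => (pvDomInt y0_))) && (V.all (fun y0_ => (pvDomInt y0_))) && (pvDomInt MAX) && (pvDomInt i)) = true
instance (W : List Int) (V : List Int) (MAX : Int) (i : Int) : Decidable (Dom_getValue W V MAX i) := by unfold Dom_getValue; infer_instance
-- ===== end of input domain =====

-- B restructures A's naive branching recursion into memoized dynamic programming over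
-- (capacity, item) states in a dictionary, solving each reachable state once (objective: alternative).

-- ===== PORT A =====
def getValue (W : List Int) (V : List Int) (MAX : Int) (i : Int) : Int × Int :=
  if i > 1 then
    let dn := getValue W V MAX (i - 1)
    let wi := (PySem.List.pyGet? W (i - 1)).getD 0   -- none = IndexError, excluded by Pre_
    if wi > MAX then
      dn
    else
      let ch := getValue W V (MAX - wi) (i - 1)
      let vi := (PySem.List.pyGet? V (i - 1)).getD 0
      if ch.1 + vi > dn.1 then (ch.1 + vi, ch.2) else dn
  else
    let w0 := (PySem.List.pyGet? W 0).getD 0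
    if w0 > MAX then (0, MAX)
    else ((PySem.List.pyGet? V 0).getD 0, MAX - w0)
termination_by i.toNat
decreasing_by all_goals omega

-- ===== PORT B =====
def solveMemo (W : List Int) (V : List Int) (cap : Int) (j : Int)
    (memo : PySem.Dict (Int × Int) (Int × Int)) :
    (Int × Int) × PySem.Dict (Int × Int) (Int × Int) :=
  match memo.get? (cap, j) with
  | some r => (r, memo)
  | none =>
    if j > 1 then
      let s0 := solveMemo W V cap (j - 1) memo
      let wj := (PySem.List.pyGet? W (j - 1)).getD 0
      if wj > cap then
        (s0.1, s0.2.insert (cap, j) s0.1)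
      else
        let s1 := solveMemo W V (cap - wj) (j - 1) s0.2
        let vj := (PySem.List.pyGet? V (j - 1)).getD 0
        let res := if s1.1.1 + vj > s0.1.1 then (s1.1.1 + vj, s1.1.2) else s0.1
        (res, s1.2.insert (cap, j) res)
    else
      let w0 := (PySem.List.pyGet? W 0).getD 0
      let res := if w0 > cap then ((0 : Int), cap)
                 else ((PySem.List.pyGet? V 0).getD 0, cap - w0)
      (res, memo.insert (cap, j) res)
termination_by j.toNat
decreasing_by all_goals omega

def getValue_alt (W : List Int) (V : List Int) (MAX : Int) (i : Int) : Int × Int :=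
  (solveMemo W V MAX i PySem.Dict.empty).1

-- ===== PRECONDITION & SPEC =====
-- Pre_ is slightly narrower than "A returns": A can also return when V is too short or
-- empty but the corresponding item never fits in the capacity, so V's entry is never read.
def Pre_getValue (W : List Int) (V : List Int) (MAX : Int) (i : Int) : Prop :=
  0 < W.length ∧ 0 < V.length ∧ i ≤ (W.length : Int) ∧ i ≤ (V.length : Int)
instance (W : List Int) (V : List Int) (MAX : Int) (i : Int) : Decidable (Pre_getValue W V MAX i) := by unfold Pre_getValue; infer_instance
def pvWitness_getValue : List Int × List Int × Int × Int := ([2, 3], [3, 4], 5, 2)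

def Spec_getValue (W : List Int) (V : List Int) (MAX : Int) (i : Int) (out : Int × Int) : Prop := out = getValue_alt W V MAX i
instance (W : List Int) (V : List Int) (MAX : Int) (i : Int) (out : Int × Int) : Decidable (Spec_getValue W V MAX i out) := by unfold Spec_getValue; infer_instance

-- ===== CLAIM (what is proved, stated in full; the proofs are below) =====
def Claim_equal_getValue : Prop := ∀ (W : List Int) (V : List Int) (MAX : Int) (i : Int), Dom_getValue W V MAX i → Pre_getValue W V MAX i → Spec_getValue W V MAX i (getValue W V MAX i)

-- ===== LEMMAS AND PROOFS =====

-- A memo table is good when every stored entry is the value A's recursion gives for its key.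
def GoodMemo (W : List Int) (V : List Int) (memo : PySem.Dict (Int × Int) (Int × Int)) : Prop :=
  ∀ k r, memo.get? k = some r → r = getValue W V k.1 k.2

lemma goodMemo_empty (W V : List Int) : GoodMemo W V PySem.Dict.empty := by
  intro k r h
  simp [PySem.Dict.get?_empty] at h

lemma goodMemo_insert (W V : List Int) (memo : PySem.Dict (Int × Int) (Int × Int))
    (cap j : Int) (r : Int × Int) (hg : GoodMemo W V memo)
    (hr : r = getValue W V cap j) :
    GoodMemo W V (memo.insert (cap, j) r) := by
  intro k v h
  rw [PySem.Dict.get?_insert] at h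
  split at h
  · rename_i hk
    subst hk
    simpa [hr] using h.symm
  · exact hg k v h

-- one-step unfoldings of A's recursion
lemma getValue_big (W V : List Int) (cap j : Int) (hj : j > 1) :
    getValue W V cap j =
      (if (PySem.List.pyGet? W (j - 1)).getD 0 > cap then getValue W V cap (j - 1)
       else
         if (getValue W V (cap - (PySem.List.pyGet? W (j - 1)).getD 0) (j - 1)).1 +
              (PySem.List.pyGet? V (j - 1)).getD 0 > (getValue W V cap (j - 1)).1 then
           ((getValue W V (cap - (PySem.List.pyGet? W (j - 1)).getD 0) (j - 1)).1 +
              (PySem.List.pyGet? V (j - 1)).getD 0,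
            (getValue W V (cap - (PySem.List.pyGet? W (j - 1)).getD 0) (j - 1)).2)
         else getValue W V cap (j - 1)) := by
  conv_lhs => rw [getValue]
  rw [if_pos hj]

lemma getValue_small (W V : List Int) (cap j : Int) (hj : ¬ j > 1) :
    getValue W V cap j =
      (if (PySem.List.pyGet? W 0).getD 0 > cap then (0, cap)
       else ((PySem.List.pyGet? V 0).getD 0, cap - (PySem.List.pyGet? W 0).getD 0)) := by
  conv_lhs => rw [getValue]
  rw [if_neg hj]

lemma solveMemo_hit (W V : List Int) (cap j : Int)
    (memo : PySem.Dict (Int × Int) (Int × Int)) (r : Int × Int)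
    (h : memo.get? (cap, j) = some r) :
    solveMemo W V cap j memo = (r, memo) := by
  rw [solveMemo, h]

-- Main invariant: under a good memo, solveMemo returns A's value and keeps the memo good.
lemma solveMemo_correct (W V : List Int) :
    ∀ n (j cap : Int) (memo : PySem.Dict (Int × Int) (Int × Int)),
      j.toNat ≤ n → GoodMemo W V memo →
      (solveMemo W V cap j memo).1 = getValue W V cap j ∧
      GoodMemo W V (solveMemo W V cap j memo).2 := by
  intro n
  induction n with
  | zero =>
    intro j cap memo hj hg
    have hj1 : ¬ j > 1 := by omega
    cases hget : memo.get? (cap, j) with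
    | some r =>
      rw [solveMemo_hit W V cap j memo r hget]
      exact ⟨hg (cap, j) r hget, hg⟩
    | none =>
      rw [solveMemo, hget]
      try dsimp only
      rw [if_neg hj1]
      try dsimp only
      refine ⟨(getValue_small W V cap j hj1).symm, ?_⟩
      exact goodMemo_insert W V memo cap j _ hg (getValue_small W V cap j hj1).symm
  | succ n ih =>
    intro j cap memo hj hg
    cases hget : memo.get? (cap, j) with
    | some r =>
      rw [solveMemo_hit W V cap j memo r hget]
      exact ⟨hg (cap, j) r hget, hg⟩
    | none =>
      by_cases hj1 : j > 1
      · have hlt : (j - 1).toNat ≤ n := by omega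
        obtain ⟨h0v, h0g⟩ := ih (j - 1) cap memo hlt hg
        rw [solveMemo, hget]
        try dsimp only
        rw [if_pos hj1]
        try dsimp only
        by_cases hw : (PySem.List.pyGet? W (j - 1)).getD 0 > cap
        · rw [if_pos hw]
          try dsimp only
          have hr : (solveMemo W V cap (j - 1) memo).1 = getValue W V cap j := by
            rw [getValue_big W V cap j hj1, if_pos hw]
            exact h0v
          exact ⟨hr, goodMemo_insert W V _ cap j _ h0g hr⟩
        · rw [if_neg hw]
          try dsimp only
          obtain ⟨h1v, h1g⟩ :=
            ih (j - 1) (cap - (PySem.List.pyGet? W (j - 1)).getD 0)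
              (solveMemo W V cap (j - 1) memo).2 hlt h0g
          have hr :
              (if (solveMemo W V (cap - (PySem.List.pyGet? W (j - 1)).getD 0) (j - 1)
                     (solveMemo W V cap (j - 1) memo).2).1.1 +
                    (PySem.List.pyGet? V (j - 1)).getD 0 >
                    (solveMemo W V cap (j - 1) memo).1.1 then
                 ((solveMemo W V (cap - (PySem.List.pyGet? W (j - 1)).getD 0) (j - 1)
                     (solveMemo W V cap (j - 1) memo).2).1.1 +
                    (PySem.List.pyGet? V (j - 1)).getD 0,
                  (solveMemo W V (cap - (PySem.List.pyGet? W (j - 1)).getD 0) (j - 1)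
                     (solveMemo W V cap (j - 1) memo).2).1.2)
               else (solveMemo W V cap (j - 1) memo).1) = getValue W V cap j := by
            rw [getValue_big W V cap j hj1, if_neg hw, h0v, h1v]
          exact ⟨hr, goodMemo_insert W V _ cap j _ h1g hr⟩
      · have hj0 : ¬ j > 1 := hj1
        rw [solveMemo, hget]
        try dsimp only
        rw [if_neg hj0]
        try dsimp only
        refine ⟨(getValue_small W V cap j hj0).symm, ?_⟩
        exact goodMemo_insert W V memo cap j _ hg (getValue_small W V cap j hj0).symm

-- ===== VERDICT (by name: the statement is the Claim_ definition above) =====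
theorem getValue_spec : Claim_equal_getValue := by
  intro W V MAX i _ _
  unfold Spec_getValue getValue_alt
  exact ((solveMemo_correct W V i.toNat i MAX PySem.Dict.empty le_rfl
    (goodMemo_empty W V)).1).symm
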